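-- pv_equiv track=rewrite | github.com/bradfordvt/pypicotcl | pypicotcl/pypicotcl.py | __is_str_is_print
-- ===== SOURCE A (Python) =====
-- def __is_str_is_print(s, failindex):
--     if s.isprintable():
--         return 1, 0
--     elif failindex:
--         for index in range(0, len(s)):
--             if s[index].isprintable():
--                 continue
--             else:
--                 return 0, index
--     else:
--         return 0, 0
-- ===== SOURCE B (Python) =====
-- def __is_str_is_print(s, failindex):
--     bad = [i for i, c in enumerate(s) if not c.isprintable()]
--     if not bad:
--         return 1, 0
--     return 0, (bad[0] if failindex else 0)
-- ===== Notes on version B (the rewrite author's own statement) =====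
-- stated objective: alternative
-- what changed: B builds the list of all non-printable indices in one comprehension over enumerate(s) and decides the three outcomes from whether that list is empty and its head, instead of A's full s.isprintable() check followed by a second index-locating loop.
import Mathlib
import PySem

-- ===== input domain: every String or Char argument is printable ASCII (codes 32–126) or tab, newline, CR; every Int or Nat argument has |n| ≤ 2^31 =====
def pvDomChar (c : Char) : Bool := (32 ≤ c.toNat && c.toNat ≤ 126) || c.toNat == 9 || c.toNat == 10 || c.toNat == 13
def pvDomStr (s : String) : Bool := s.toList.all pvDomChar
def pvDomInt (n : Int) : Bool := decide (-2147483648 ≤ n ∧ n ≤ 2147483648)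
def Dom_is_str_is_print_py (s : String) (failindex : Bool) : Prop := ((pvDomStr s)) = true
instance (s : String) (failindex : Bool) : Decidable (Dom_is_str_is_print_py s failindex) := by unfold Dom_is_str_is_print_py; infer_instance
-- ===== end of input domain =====

-- B collects every non-printable index in one comprehension over enumerate(s) and reads the three outcomes off that list, instead of A's full printability check plus a second locating loop (alternative decomposition, same cost).
-- ===== PORT A =====
-- c.isprintable(): exact on Dom (printable ASCII 32–126 printable; tab/newline/CR not)
def pyIsPrintable (c : Char) : Bool := 32 ≤ c.toNat && c.toNat ≤ 126

-- the 'for index in range(0, len(s))' loop of A; [] case is unreachable (Python would fall through returning None)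
def isPrintLoopA : List Char → Int → Int × Int
  | [], _ => (0, 0)
  | c :: t, i => if pyIsPrintable c then isPrintLoopA t (i + 1) else (0, i)

def is_str_is_print_py (s : String) (failindex : Bool) : Int × Int :=
  if s.toList.all pyIsPrintable then (1, 0)
  else if failindex then isPrintLoopA s.toList 0
  else (0, 0)

-- ===== PORT B =====
-- bad = [i for i, c in enumerate(s) if not c.isprintable()]
def badIdxs (s : String) : List Int :=
  (PySem.List.enumerate s.toList 0).filterMap
    (fun p => if !(pyIsPrintable p.2) then some p.1 else none)

def is_str_is_print_py_alt (s : String) (failindex : Bool) : Int × Int :=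
  match badIdxs s with
  | [] => (1, 0)
  | j :: _ => (0, if failindex then j else 0)

-- ===== PRECONDITION & SPEC =====
def Spec_is_str_is_print_py (s : String) (failindex : Bool) (out : Int × Int) : Prop := out = is_str_is_print_py_alt s failindex
instance (s : String) (failindex : Bool) (out : Int × Int) : Decidable (Spec_is_str_is_print_py s failindex out) := by unfold Spec_is_str_is_print_py; infer_instance

-- ===== CLAIM (what is proved, stated in full; the proofs are below) =====
def Claim_equal_is_str_is_print_py : Prop := ∀ (s : String) (failindex : Bool), Dom_is_str_is_print_py s failindex → Spec_is_str_is_print_py s failindex (is_str_is_print_py s failindex)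

-- ===== LEMMAS AND PROOFS =====

-- the comprehension, generalized over the enumeration start index
def badFrom (l : List Char) (i : Int) : List Int :=
  (PySem.List.enumerate l i).filterMap
    (fun p => if !(pyIsPrintable p.2) then some p.1 else none)

lemma badFrom_nil (i : Int) : badFrom [] i = [] := rfl

lemma badFrom_cons (c : Char) (t : List Char) (i : Int) :
    badFrom (c :: t) i =
      if pyIsPrintable c then badFrom t (i + 1) else i :: badFrom t (i + 1) := by
  simp only [badFrom, PySem.List.enumerate_cons, List.filterMap_cons]
  by_cases h : pyIsPrintable c <;> simp [h]

lemma badFrom_eq_nil_iff (l : List Char) (i : Int) :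
    badFrom l i = [] ↔ l.all pyIsPrintable := by
  induction l generalizing i with
  | nil => simp [badFrom_nil]
  | cons c t ih =>
    rw [badFrom_cons]
    by_cases h : pyIsPrintable c <;> simp [h, ih]

lemma loopA_eq_head (l : List Char) (i : Int) (j : Int) (rest : List Int)
    (h : badFrom l i = j :: rest) : isPrintLoopA l i = (0, j) := by
  induction l generalizing i with
  | nil => simp [badFrom_nil] at h
  | cons c t ih =>
    rw [badFrom_cons] at h
    by_cases hc : pyIsPrintable c
    · rw [if_pos hc] at h
      simpa [isPrintLoopA, hc] using ih (i + 1) h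
    · rw [if_neg hc] at h
      simp [isPrintLoopA, hc, (List.cons.injEq .. ▸ h).1]

-- ===== VERDICT (by name: the statement is the Claim_ definition above) =====
theorem is_str_is_print_py_spec : Claim_equal_is_str_is_print_py := by
  intro s failindex _
  unfold Spec_is_str_is_print_py is_str_is_print_py is_str_is_print_py_alt
  have hbad : badIdxs s = badFrom s.toList 0 := rfl
  by_cases hall : s.toList.all pyIsPrintable
  · simp [hall, hbad, (badFrom_eq_nil_iff s.toList 0).mpr hall]
  · have hne : badFrom s.toList 0 ≠ [] := fun h =>
      hall ((badFrom_eq_nil_iff s.toList 0).mp h)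
    obtain ⟨j, rest, h⟩ := List.exists_cons_of_ne_nil hne
    cases failindex <;>
      simp [hall, hbad, h, loopA_eq_head s.toList 0 j rest h]
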